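-- pv_equiv track=rewrite | github.com/hdavidzhu/software_design_hdavidzhu | exam1/exam1.py | in_language
-- ===== SOURCE A (Python) =====
-- def in_language(s):
--     """
--     inputs: string.
--     returns: True if and only if the string begins with a sequence of zero or more 'a's, ends with an equal number of 'b's, and contain no other characters.
--     """
--     a_count, b_count = 0, 0
--
--     for char in s:
--         if char == 'a':
--             a_count += 1
--         else: break
--     for char in s[::-1]:
--         if char == 'b':
--             b_count += 1
--         else: break
--
--     if a_count + b_count < len(s):
--         return False
--     else:
--         return a_count == b_count
-- ===== SOURCE B (Python) =====
-- def in_language(s):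
--     n = len(s) // 2
--     return s == 'a' * n + 'b' * n
-- ===== Notes on version B (the rewrite author's own statement) =====
-- stated objective: simpler
-- what changed: Replaced the two counting loops (leading a's, trailing b's) and the coverage/equality test by constructing the unique canonical member 'a'*n+'b'*n with n=len(s)//2 and comparing the whole string to it.
import Mathlib
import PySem

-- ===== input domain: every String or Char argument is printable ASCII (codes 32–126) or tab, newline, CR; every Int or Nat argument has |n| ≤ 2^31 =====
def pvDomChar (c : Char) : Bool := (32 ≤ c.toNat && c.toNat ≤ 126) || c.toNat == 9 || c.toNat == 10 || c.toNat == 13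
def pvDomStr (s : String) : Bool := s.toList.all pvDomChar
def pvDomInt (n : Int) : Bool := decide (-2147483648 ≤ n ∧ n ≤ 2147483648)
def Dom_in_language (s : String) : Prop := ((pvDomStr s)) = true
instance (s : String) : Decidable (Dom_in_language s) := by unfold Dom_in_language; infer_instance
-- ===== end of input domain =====

-- B replaces A's two counting loops by building the canonical word 'a'*n+'b'*n (n = len//2)
-- and comparing the whole string to it (objective: simpler).

-- ===== PORT A =====
-- the first Python for-loop with break: count leading 'a's
def pvCountA : List Char → Int
  | [] => 0
  | c :: t => if c = 'a' then pvCountA t + 1 else 0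

-- the second Python for-loop (over s[::-1]) with break: count leading 'b's of the reversed string
def pvCountB : List Char → Int
  | [] => 0
  | c :: t => if c = 'b' then pvCountB t + 1 else 0

def in_language (s : String) : Bool :=
  let a_count := pvCountA s.toList
  let b_count := pvCountB s.toList.reverse   -- s[::-1] is exactly the reversed character list
  if a_count + b_count < (s.toList.length : Int) then false
  else a_count == b_count

-- ===== PORT B =====
def in_language_alt (s : String) : Bool :=
  let n := s.toList.length / 2               -- len(s) // 2; len ≥ 0 so Nat division is Python's //
  s == String.ofList (List.replicate n 'a' ++ List.replicate n 'b')   -- 'a'*n + 'b'*n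

-- ===== PRECONDITION & SPEC =====
def Spec_in_language (s : String) (out : Bool) : Prop := out = in_language_alt s
instance (s : String) (out : Bool) : Decidable (Spec_in_language s out) := by unfold Spec_in_language; infer_instance

-- ===== CLAIM (what is proved, stated in full; the proofs are below) =====
def Claim_equal_in_language : Prop := ∀ (s : String), Dom_in_language s → Spec_in_language s (in_language s)

-- ===== LEMMAS AND PROOFS =====

-- Nat-valued view of the counting loops
def pvLead (c : Char) : List Char → Nat
  | [] => 0
  | x :: t => if x = c then pvLead c t + 1 else 0

theorem pvCountA_eq (l : List Char) : pvCountA l = (pvLead 'a' l : Nat) := by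
  induction l with
  | nil => rfl
  | cons x t ih => simp only [pvCountA, pvLead]; split_ifs <;> simp [ih]

theorem pvCountB_eq (l : List Char) : pvCountB l = (pvLead 'b' l : Nat) := by
  induction l with
  | nil => rfl
  | cons x t ih => simp only [pvCountB, pvLead]; split_ifs <;> simp [ih]

theorem pvLead_le (c : Char) (l : List Char) : pvLead c l ≤ l.length := by
  induction l with
  | nil => simp [pvLead]
  | cons x t ih => simp [pvLead]; split <;> simp <;> omega

theorem take_pvLead (c : Char) (l : List Char) :
    l.take (pvLead c l) = List.replicate (pvLead c l) c := by
  induction l with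
  | nil => simp [pvLead]
  | cons x t ih =>
    simp only [pvLead]
    split
    · next h => subst h; simp [List.replicate_succ, ih]
    · simp

theorem pvLead_replicate_ne (c d : Char) (h : c ≠ d) (n : Nat) :
    pvLead c (List.replicate n d) = 0 := by
  cases n with
  | zero => rfl
  | succ m => simp [List.replicate_succ, pvLead, Ne.symm h]

theorem pvLead_replicate_append (c : Char) (n : Nat) (t : List Char) :
    pvLead c (List.replicate n c ++ t) = n + pvLead c t := by
  induction n with
  | zero => simp
  | succ m ih => simp [List.replicate_succ, pvLead, ih]; omega

theorem pvLead_getElem (c : Char) (l : List Char) (i : Nat) (hi : i < pvLead c l)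
    (hl : i < l.length) : l[i] = c := by
  have h1 : (l.take (pvLead c l))[i]'(by simp; omega) = l[i] := List.getElem_take
  rw [List.getElem_of_eq (take_pvLead c l)] at h1
  simp at h1
  exact h1.symm

-- suffix view: the last (pvLead 'b' l.reverse) characters of l are all 'b'
theorem drop_suffix (l : List Char) (b : Nat) (hb : l.reverse.take b = List.replicate b 'b') :
    l.drop (l.length - b) = List.replicate b 'b' := by
  have h : (l.reverse.take b).reverse = l.drop (l.length - b) := by
    simpa using List.reverse_take (l := l.reverse) (i := b)
  rw [hb, List.reverse_replicate] at h
  exact h.symm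

-- core equivalence on lists
theorem core (l : List Char) :
    (let a := pvLead 'a' l; let b := pvLead 'b' l.reverse;
      (¬ (a + b < l.length)) ∧ a = b)
    ↔ l = List.replicate (l.length / 2) 'a' ++ List.replicate (l.length / 2) 'b' := by
  constructor
  · rintro ⟨hge, heq⟩
    set a := pvLead 'a' l with ha
    set b := pvLead 'b' l.reverse with hb
    have hal : a ≤ l.length := pvLead_le _ _
    have hbl : b ≤ l.length := by simpa using pvLead_le 'b' l.reverse
    have hsuf : l.drop (l.length - b) = List.replicate b 'b' :=
      drop_suffix l b (by rw [take_pvLead])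
    -- no overlap: a + b ≤ l.length
    have hnov : a + b ≤ l.length := by
      by_contra hov
      push_neg at hov
      have hb0 : 0 < b := by omega
      have hi : l.length - b < a := by omega
      have hil : l.length - b < l.length := by omega
      have hA : l[l.length - b]'hil = 'a' := pvLead_getElem 'a' l _ hi hil
      have hB : l[l.length - b]'hil = 'b' := by
        have hlen0 : 0 < (l.drop (l.length - b)).length := by simp; omega
        have h0 : (l.drop (l.length - b))[0]'hlen0 = 'b' := by
          rw [List.getElem_of_eq hsuf]; simp
        have h1 : (l.drop (l.length - b))[0]'hlen0 = l[l.length - b + 0]'(by omega) :=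
          List.getElem_drop
        simpa using h1.symm.trans h0
      rw [hA] at hB; exact absurd hB (by decide)
    have hlen : a + b = l.length := by omega
    have hn : l.length / 2 = a := by omega
    rw [hn]
    have hpre : l.take a = List.replicate a 'a' := take_pvLead 'a' l
    have hdrop : l.drop a = List.replicate b 'b' := by
      have : a = l.length - b := by omega
      rw [this, hsuf]
    calc l = l.take a ++ l.drop a := (List.take_append_drop a l).symm
      _ = List.replicate a 'a' ++ List.replicate a 'b' := by rw [hpre, hdrop, heq]
  · intro h
    have hlen : l.length = l.length / 2 * 2 := by
      rw [h]; simp; omega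
    set n := l.length / 2 with hn
    have ha : pvLead 'a' l = n := by
      rw [h, pvLead_replicate_append, pvLead_replicate_ne 'a' 'b' (by decide), Nat.add_zero]
    have hrev : l.reverse = List.replicate n 'b' ++ List.replicate n 'a' := by
      rw [h]; simp [List.reverse_replicate]
    have hbv : pvLead 'b' l.reverse = n := by
      rw [hrev, pvLead_replicate_append, pvLead_replicate_ne 'b' 'a' (by decide), Nat.add_zero]
    refine ⟨?_, by rw [ha, hbv]⟩
    rw [ha, hbv]; omega

-- ===== VERDICT (by name: the statement is the Claim_ definition above) =====
theorem in_language_spec : Claim_equal_in_language := by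
  intro s _
  unfold Spec_in_language in_language in_language_alt
  simp only [pvCountA_eq, pvCountB_eq]
  have hcore := core s.toList
  simp only at hcore
  have hiff : s = String.ofList (List.replicate (s.toList.length / 2) 'a' ++
      List.replicate (s.toList.length / 2) 'b') ↔
      s.toList = List.replicate (s.toList.length / 2) 'a' ++
      List.replicate (s.toList.length / 2) 'b' := by
    rw [← String.toList_inj]; simp
  by_cases hlt : (pvLead 'a' s.toList : Int) + (pvLead 'b' s.toList.reverse : Int) <
      (s.toList.length : Int)
  · rw [if_pos hlt]
    symm
    rw [beq_eq_false_iff_ne]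
    intro hEq
    have hL := hcore.mpr (hiff.mp hEq)
    have : ¬ ((pvLead 'a' s.toList : Int) + (pvLead 'b' s.toList.reverse : Int) <
        (s.toList.length : Int)) := by exact_mod_cast hL.1
    exact this hlt
  · rw [if_neg hlt]
    have hnat : ¬ (pvLead 'a' s.toList + pvLead 'b' s.toList.reverse < s.toList.length) := by
      intro h; exact hlt (by exact_mod_cast h)
    by_cases heq : pvLead 'a' s.toList = pvLead 'b' s.toList.reverse
    · have hs : s = String.ofList (List.replicate (s.toList.length / 2) 'a' ++
          List.replicate (s.toList.length / 2) 'b') := hiff.mpr (hcore.mp ⟨hnat, heq⟩)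
      rw [← hs] at *
      simp [heq]
    · have hs : s ≠ String.ofList (List.replicate (s.toList.length / 2) 'a' ++
          List.replicate (s.toList.length / 2) 'b') := fun h => heq (hcore.mpr (hiff.mp h)).2
      rw [beq_eq_false_iff_ne.mpr hs]
      rw [beq_eq_false_iff_ne]
      intro h
      exact heq (by exact_mod_cast h)
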